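-- pv_equiv track=rewrite | github.com/MarkWolters/RefChecker | refchecker/checker/repc/repe.py | aggregate_labels
-- ===== SOURCE A (Python) =====
-- def aggregate_labels(labels):
--     """Aggregate labels on decomposed units."""
--     ret = "Entailment"
--     for label in labels:
--         if label == "Neutral" and ret == "Entailment":
--             ret = label
--         if label == "Contradiction":
--             ret = label
--             break
--     return ret
-- ===== SOURCE B (Python) =====
-- def aggregate_labels(labels):
--     """Aggregate labels on decomposed units."""
--     if "Contradiction" in labels:
--         return "Contradiction"
--     if "Neutral" in labels:
--         return "Neutral"
--     return "Entailment"
-- ===== Notes on version B (the rewrite author's own statement) =====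
-- stated objective: simpler
-- what changed: Replaced the stateful accumulator loop with break by two priority membership tests (Contradiction, then Neutral) and a default.
import Mathlib
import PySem

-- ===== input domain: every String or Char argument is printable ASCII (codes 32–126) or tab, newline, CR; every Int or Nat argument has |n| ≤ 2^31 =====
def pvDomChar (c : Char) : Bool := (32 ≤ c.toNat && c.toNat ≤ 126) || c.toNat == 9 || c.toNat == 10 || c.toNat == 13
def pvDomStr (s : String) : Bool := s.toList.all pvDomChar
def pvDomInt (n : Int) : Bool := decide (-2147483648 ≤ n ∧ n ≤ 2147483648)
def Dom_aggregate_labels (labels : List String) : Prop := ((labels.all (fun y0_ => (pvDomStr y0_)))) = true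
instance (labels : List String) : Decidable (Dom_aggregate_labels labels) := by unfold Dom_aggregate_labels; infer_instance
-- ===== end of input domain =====

-- B replaces A's stateful single-pass loop with two priority membership tests (simpler decomposition).


-- ===== PORT A =====
-- the for-loop with its 'ret' accumulator and early break, as structural recursion
def aggregate_labels_loop (labels : List String) (ret : String) : String :=
  match labels with
  | [] => ret
  | label :: rest =>
    let ret := if label == "Neutral" && ret == "Entailment" then label else ret
    if label == "Contradiction" then label
    else aggregate_labels_loop rest ret

def aggregate_labels (labels : List String) : String :=
  aggregate_labels_loop labels "Entailment"

-- ===== PORT B =====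
def aggregate_labels_alt (labels : List String) : String :=
  if labels.contains "Contradiction" then "Contradiction"
  else if labels.contains "Neutral" then "Neutral"
  else "Entailment"

-- ===== PRECONDITION & SPEC =====
def Spec_aggregate_labels (labels : List String) (out : String) : Prop := out = aggregate_labels_alt labels
instance (labels : List String) (out : String) : Decidable (Spec_aggregate_labels labels out) := by unfold Spec_aggregate_labels; infer_instance

-- ===== CLAIM (what is proved, stated in full; the proofs are below) =====
def Claim_equal_aggregate_labels : Prop := ∀ (labels : List String), Dom_aggregate_labels labels → Spec_aggregate_labels labels (aggregate_labels labels)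

-- ===== LEMMAS AND PROOFS =====

-- loop invariant: from either reachable accumulator state the loop computes the priority answer
theorem aggregate_labels_loop_eq (labels : List String) :
    aggregate_labels_loop labels "Entailment" = aggregate_labels_alt labels ∧
    aggregate_labels_loop labels "Neutral" =
      (if labels.contains "Contradiction" then "Contradiction" else "Neutral") := by
  induction labels with
  | nil => simp [aggregate_labels_loop, aggregate_labels_alt]
  | cons l ls ih =>
    obtain ⟨ih1, ih2⟩ := ih
    by_cases hc : l = "Contradiction"
    · subst hc
      constructor <;> simp [aggregate_labels_loop, aggregate_labels_alt]
    · by_cases hn : l = "Neutral"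
      · subst hn
        constructor <;>
          simp [aggregate_labels_loop, aggregate_labels_alt, ih2, Ne.symm hc]
      · constructor <;>
          simp [aggregate_labels_loop, aggregate_labels_alt, ih1, ih2,
            hc, hn, Ne.symm hc, Ne.symm hn]

-- ===== VERDICT (by name: the statement is the Claim_ definition above) =====
theorem aggregate_labels_spec : Claim_equal_aggregate_labels := by
  intro labels _
  unfold Spec_aggregate_labels aggregate_labels
  exact (aggregate_labels_loop_eq labels).1
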